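-- pv_equiv track=rewrite | github.com/programmers-algorithm-study-team5/code-review | 1주차_모의고사.py | solution
-- ===== SOURCE A (Python) =====
-- def solution(answers):
--     patterns = [
--         [1, 2, 3, 4, 5],
--         [2, 1, 2, 3, 2, 4, 2, 5],
--         [3, 3, 1, 1, 2, 2, 4, 4, 5, 5]
--     ]
--
--     scores = [0, 0, 0]
--     result = []
--
--     for i, answer in enumerate(answers):
--         for j in range(3):
--             if answer == patterns[j][i%len(patterns[j])]:
--                 scores[j] += 1
--
--     max_score = max(scores)
--
--     for i in range(3):
--         if scores[i] == max_score:
--             result.append(i + 1)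
--
--     return result
-- ===== SOURCE B (Python) =====
-- def solution(answers):
--     patterns = [
--         [1, 2, 3, 4, 5],
--         [2, 1, 2, 3, 2, 4, 2, 5],
--         [3, 3, 1, 1, 2, 2, 4, 4, 5, 5]
--     ]
--     # Histogram over residue classes: all three pattern lengths divide 40
--     # (lcm(5, 8, 10) = 40), so an answer at position i matches pattern p iff
--     # it equals p at residue i % 40.  Build a histogram of (i % 40, answer)
--     # pairs in one pass, then each score is 40 table lookups.
--     keys = [(i % 40, a) for i, a in enumerate(answers)]
--     counts = {}
--     for k in keys:
--         counts[k] = counts.get(k, 0) + 1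
--     scores = []
--     for p in patterns:
--         scores.append(sum(counts.get((r, p[r % len(p)]), 0) for r in range(40)))
--     m = max(scores)
--     return [i + 1 for i, s in enumerate(scores) if s == m]
-- ===== Notes on version B (the rewrite author's own statement) =====
-- stated objective: alternative
-- what changed: B replaces A's per-element match loop by a residue-class histogram: since every pattern length divides 40, it builds a dict counting (i % 40, answer) pairs in one pass and computes each pattern's score as 40 histogram lookups, then the same max-and-collect phase.
import Mathlib
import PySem

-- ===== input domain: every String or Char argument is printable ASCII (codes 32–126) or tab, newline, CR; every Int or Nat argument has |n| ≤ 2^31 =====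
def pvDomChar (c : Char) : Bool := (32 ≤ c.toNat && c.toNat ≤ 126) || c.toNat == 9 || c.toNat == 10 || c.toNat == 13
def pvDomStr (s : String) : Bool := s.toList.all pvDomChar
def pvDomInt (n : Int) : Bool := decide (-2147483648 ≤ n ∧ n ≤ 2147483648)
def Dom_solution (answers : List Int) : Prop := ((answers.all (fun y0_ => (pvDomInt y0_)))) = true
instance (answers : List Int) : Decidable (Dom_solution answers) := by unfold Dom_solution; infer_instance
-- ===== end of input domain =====

-- B replaces A's per-element match loop by a residue-class histogram (all pattern lengths
-- divide 40): one pass builds a dict counting (i % 40, answer) pairs, then each pattern's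
-- score is 40 histogram lookups; same max-and-collect phase. Objective: alternative.


-- ===== PORT A =====
def pvPatterns : List (List Int) :=
  [[1, 2, 3, 4, 5], [2, 1, 2, 3, 2, 4, 2, 5], [3, 3, 1, 1, 2, 2, 4, 4, 5, 5]]

-- for i, answer in enumerate(answers): for j in range(3): if answer == patterns[j][i%len(patterns[j])]: scores[j] += 1
def pvScoresA (answers : List Int) : List Int :=
  (PySem.List.enumerate answers).foldl (fun scores p =>
    (PySem.List.pyRange 0 3 1).foldl (fun scores j =>
      let pat := PySem.List.pyGetD pvPatterns j []
      if p.2 == PySem.List.pyGetD pat (PySem.Int.mod p.1 (pat.length : Int)) 0 then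
        PySem.List.pySetD scores j (PySem.List.pyGetD scores j 0 + 1)
      else scores) scores) [0, 0, 0]

def solution (answers : List Int) : List Int :=
  let scores := pvScoresA answers
  -- max(scores): scores always has exactly 3 elements, so max? is never none; .getD 0 is unreachable
  let max_score := (PySem.List.max? scores (fun x => x)).getD 0
  (PySem.List.pyRange 0 3 1).foldl (fun result i =>
    if PySem.List.pyGetD scores i 0 == max_score then result ++ [i + 1] else result) []

-- ===== PORT B =====
-- keys = [(i % 40, a) for i, a in enumerate(answers)]
def pvKeys (answers : List Int) : List (Int × Int) :=
  (PySem.List.enumerate answers).map (fun q => (PySem.Int.mod q.1 40, q.2))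

-- for k in keys: counts[k] = counts.get(k, 0) + 1
def pvCounts (answers : List Int) : PySem.Dict (Int × Int) Int :=
  (pvKeys answers).foldl (fun d k => d.insert k (d.getD k 0 + 1)) PySem.Dict.empty

-- sum(counts.get((r, p[r % len(p)]), 0) for r in range(40))
def pvPatScoreC (counts : PySem.Dict (Int × Int) Int) (p : List Int) : Int :=
  ((PySem.List.pyRange 0 40 1).map (fun r =>
    counts.getD (r, PySem.List.pyGetD p (PySem.Int.mod r (p.length : Int)) 0) 0)).sum

def solution_alt (answers : List Int) : List Int :=
  let counts := pvCounts answers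
  let scores := pvPatterns.map (fun p => pvPatScoreC counts p)
  let m := (PySem.List.max? scores (fun x => x)).getD 0
  (PySem.List.enumerate scores).foldl (fun r q =>
    if q.2 == m then r ++ [q.1 + 1] else r) []

-- ===== PRECONDITION & SPEC =====
def Spec_solution (answers : List Int) (out : List Int) : Prop := out = solution_alt answers
instance (answers : List Int) (out : List Int) : Decidable (Spec_solution answers out) := by unfold Spec_solution; infer_instance

-- ===== CLAIM (what is proved, stated in full; the proofs are below) =====
def Claim_equal_solution : Prop := ∀ (answers : List Int), Dom_solution answers → Spec_solution answers (solution answers)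

-- ===== LEMMAS AND PROOFS =====

-- The number of matches of answers (enumerated from i) against the cyclic pattern p.
def pvScoreFrom (p : List Int) (l : List Int) (i : Int) : Int :=
  (PySem.List.enumerate l i).foldl (fun s q =>
    s + (if q.2 == PySem.List.pyGetD p (PySem.Int.mod q.1 (p.length : Int)) 0 then 1 else 0)) 0

theorem pvScore_shift (p : List Int) (l : List Int) : ∀ (i s : Int),
    (PySem.List.enumerate l i).foldl (fun s q =>
      s + (if q.2 == PySem.List.pyGetD p (PySem.Int.mod q.1 (p.length : Int)) 0 then 1 else 0)) s
    = s + pvScoreFrom p l i := by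
  induction l with
  | nil => intro i s; simp [PySem.List.enumerate_nil, pvScoreFrom]
  | cons x xs ih =>
    intro i s
    simp only [pvScoreFrom, PySem.List.enumerate_cons, List.foldl_cons]
    rw [ih (i + 1), ih (i + 1) (0 + _)]
    ring

theorem pvScoreFrom_cons (p : List Int) (x : Int) (xs : List Int) (i : Int) :
    pvScoreFrom p (x :: xs) i
    = (if x == PySem.List.pyGetD p (PySem.Int.mod i (p.length : Int)) 0 then 1 else 0)
      + pvScoreFrom p xs (i + 1) := by
  simp only [pvScoreFrom, PySem.List.enumerate_cons, List.foldl_cons]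
  rw [pvScore_shift, zero_add]
  rfl

-- A's inner for-j loop applied to a 3-element scores list, evaluated.
theorem pvInner (x i a b c : Int) :
    (PySem.List.pyRange 0 3 1).foldl (fun scores j =>
      let pat := PySem.List.pyGetD pvPatterns j []
      if x == PySem.List.pyGetD pat (PySem.Int.mod i (pat.length : Int)) 0 then
        PySem.List.pySetD scores j (PySem.List.pyGetD scores j 0 + 1)
      else scores) [a, b, c]
    = [if x == PySem.List.pyGetD pvPatterns[0] (PySem.Int.mod i ((pvPatterns[0].length : Nat) : Int)) 0 then a + 1 else a,
       if x == PySem.List.pyGetD pvPatterns[1] (PySem.Int.mod i ((pvPatterns[1].length : Nat) : Int)) 0 then b + 1 else b,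
       if x == PySem.List.pyGetD pvPatterns[2] (PySem.Int.mod i ((pvPatterns[2].length : Nat) : Int)) 0 then c + 1 else c] := by
  have hr : PySem.List.pyRange 0 3 1 = [0, 1, 2] := by decide
  have h0 : PySem.List.pyGetD pvPatterns (0 : Int) [] = pvPatterns[0] := by decide
  have h1 : PySem.List.pyGetD pvPatterns (1 : Int) [] = pvPatterns[1] := by decide
  have h2 : PySem.List.pyGetD pvPatterns (2 : Int) [] = pvPatterns[2] := by decide
  have e0 : (if x == PySem.List.pyGetD pvPatterns[0] (PySem.Int.mod i ((pvPatterns[0].length : Nat) : Int)) 0 then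
        PySem.List.pySetD [a, b, c] (0 : Int) (PySem.List.pyGetD [a, b, c] (0 : Int) 0 + 1) else [a, b, c])
      = [if x == PySem.List.pyGetD pvPatterns[0] (PySem.Int.mod i ((pvPatterns[0].length : Nat) : Int)) 0 then a + 1 else a, b, c] := by
    split_ifs <;> simp [PySem.List.pySetD, PySem.List.pySet?, PySem.List.pyGetD,
                        PySem.List.pyGet?, PySem.List.pyIdx?]
  have e1 : ∀ (a' : Int), (if x == PySem.List.pyGetD pvPatterns[1] (PySem.Int.mod i ((pvPatterns[1].length : Nat) : Int)) 0 then
        PySem.List.pySetD [a', b, c] (1 : Int) (PySem.List.pyGetD [a', b, c] (1 : Int) 0 + 1) else [a', b, c])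
      = [a', if x == PySem.List.pyGetD pvPatterns[1] (PySem.Int.mod i ((pvPatterns[1].length : Nat) : Int)) 0 then b + 1 else b, c] := by
    intro a'
    split_ifs <;> simp [PySem.List.pySetD, PySem.List.pySet?, PySem.List.pyGetD,
                        PySem.List.pyGet?, PySem.List.pyIdx?]
  have e2 : ∀ (a' b' : Int), (if x == PySem.List.pyGetD pvPatterns[2] (PySem.Int.mod i ((pvPatterns[2].length : Nat) : Int)) 0 then
        PySem.List.pySetD [a', b', c] (2 : Int) (PySem.List.pyGetD [a', b', c] (2 : Int) 0 + 1) else [a', b', c])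
      = [a', b', if x == PySem.List.pyGetD pvPatterns[2] (PySem.Int.mod i ((pvPatterns[2].length : Nat) : Int)) 0 then c + 1 else c] := by
    intro a' b'
    split_ifs <;> simp [PySem.List.pySetD, PySem.List.pySet?, PySem.List.pyGetD,
                        PySem.List.pyGet?, PySem.List.pyIdx?]
  simp only [hr, List.foldl_cons, List.foldl_nil, h0, h1, h2]
  rw [e0, e1, e2]

-- A's interleaved pass over a 3-element scores list equals three per-pattern match counts.
theorem pvScores_split (l : List Int) : ∀ (i a b c : Int),
    (PySem.List.enumerate l i).foldl (fun scores p =>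
      (PySem.List.pyRange 0 3 1).foldl (fun scores j =>
        let pat := PySem.List.pyGetD pvPatterns j []
        if p.2 == PySem.List.pyGetD pat (PySem.Int.mod p.1 (pat.length : Int)) 0 then
          PySem.List.pySetD scores j (PySem.List.pyGetD scores j 0 + 1)
        else scores) scores) [a, b, c]
    = [a + pvScoreFrom pvPatterns[0] l i,
       b + pvScoreFrom pvPatterns[1] l i,
       c + pvScoreFrom pvPatterns[2] l i] := by
  induction l with
  | nil =>
    intro i a b c
    simp [PySem.List.enumerate_nil, pvScoreFrom]
  | cons x xs ih =>
    intro i a b c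
    simp only [PySem.List.enumerate_cons, List.foldl_cons]
    rw [pvInner, ih (i + 1), pvScoreFrom_cons, pvScoreFrom_cons, pvScoreFrom_cons]
    split_ifs <;> simp [add_assoc]

-- Composing Python mod by 40 with mod by a positive divisor of 40.
theorem pvMod_mod (i L : Int) (hL : 0 < L) (hdvd : L ∣ 40) :
    PySem.Int.mod (PySem.Int.mod i 40) L = PySem.Int.mod i L := by
  simp only [PySem.Int.mod_eq_emod_of_pos hL,
             PySem.Int.mod_eq_emod_of_pos (show (0:Int) < 40 from by omega)]
  exact Int.emod_emod_of_dvd i hdvd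

-- Over a duplicate-free list of residues, the indicator (r0, v) = (r, g r) sums to one hit.
theorem pvIndicator_sum (g : Int → Int) : ∀ (rs : List Int), rs.Nodup → ∀ (r0 v : Int),
    ((rs.map (fun r => if ((r0, v) : Int × Int) = (r, g r) then (1 : Int) else 0)).sum)
    = if r0 ∈ rs ∧ v = g r0 then 1 else 0 := by
  intro rs hnd
  induction rs with
  | nil => intro r0 v; simp
  | cons r rs ih =>
    intro r0 v
    simp only [List.map_cons, List.sum_cons, List.nodup_cons] at *
    rw [ih hnd.2]
    by_cases hr : r0 = r
    · subst hr
      have : r0 ∉ rs := hnd.1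
      by_cases hv : v = g r0 <;> simp [hv, Prod.ext_iff, this]
    · simp [Prod.ext_iff, hr]

-- The histogram lookups along a pattern sum to that pattern's match count.
theorem pvHist_sum (p : List Int) (hne : p ≠ []) (hdvd : ((p.length : Nat) : Int) ∣ 40) :
    ∀ (l : List Int) (i : Int),
    ((PySem.List.pyRange 0 40 1).map (fun r =>
      ((((PySem.List.enumerate l i).map (fun q => (PySem.Int.mod q.1 40, q.2))).count
        (r, PySem.List.pyGetD p (PySem.Int.mod r (p.length : Int)) 0) : Nat) : Int))).sum
    = pvScoreFrom p l i := by
  have hL : (0 : Int) < (p.length : Int) := by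
    have : p.length ≠ 0 := fun h => hne (List.eq_nil_of_length_eq_zero h)
    omega
  intro l
  induction l with
  | nil =>
    intro i
    simp [PySem.List.enumerate_nil, pvScoreFrom]
  | cons x xs ih =>
    intro i
    simp only [PySem.List.enumerate_cons, List.map_cons]
    have hc : ∀ (k : Int × Int),
        ((((PySem.Int.mod i 40, x) :: (PySem.List.enumerate xs (i + 1)).map
            (fun q => (PySem.Int.mod q.1 40, q.2))).count k : Nat) : Int)
        = (((PySem.List.enumerate xs (i + 1)).map
            (fun q => (PySem.Int.mod q.1 40, q.2))).count k : Nat)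
          + (if ((PySem.Int.mod i 40, x) : Int × Int) = k then (1 : Int) else 0) := by
      intro k
      rw [List.count_cons]
      push_cast
      by_cases h : ((PySem.Int.mod i 40, x) : Int × Int) = k
      · subst h; simp
      · rw [if_neg h, if_neg (fun hh : ((PySem.Int.mod i 40, x) == k) = true =>
              h (beq_iff_eq.mp hh))]
    simp only [hc]
    rw [PySem.List.sum_map_add_int, ih (i + 1), pvScoreFrom_cons]
    have hsum :
        ((PySem.List.pyRange 0 40 1).map (fun r =>
          (if ((PySem.Int.mod i 40, x) : Int × Int)
              = (r, PySem.List.pyGetD p (PySem.Int.mod r (p.length : Int)) 0) then (1 : Int) else 0))).sum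
        = if x == PySem.List.pyGetD p (PySem.Int.mod i (p.length : Int)) 0 then 1 else 0 := by
      have hmem : PySem.Int.mod i 40 ∈ PySem.List.pyRange 0 40 1 := by
        rw [PySem.List.mem_pyRange_one]
        exact ⟨PySem.Int.mod_nonneg i (by omega), PySem.Int.mod_lt i (by omega)⟩
      have hnd : (PySem.List.pyRange 0 40 1).Nodup := by decide
      rw [pvIndicator_sum
        (fun r => PySem.List.pyGetD p (PySem.Int.mod r (p.length : Int)) 0)
        (PySem.List.pyRange 0 40 1) hnd (PySem.Int.mod i 40) x]
      rw [pvMod_mod i (p.length : Int) hL hdvd]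
      by_cases hx : x = PySem.List.pyGetD p (PySem.Int.mod i (p.length : Int)) 0
      · simp only [hx, beq_self_eq_true, if_true, and_true]
        rw [if_pos hmem]
      · simp [hx]
    rw [hsum]
    ring

-- B's per-pattern score over the histogram is that pattern's match count.
theorem pvPatScoreC_eq (answers : List Int) (p : List Int) (hne : p ≠ [])
    (hdvd : ((p.length : Nat) : Int) ∣ 40) :
    pvPatScoreC (pvCounts answers) p = pvScoreFrom p answers 0 := by
  unfold pvPatScoreC pvCounts pvKeys
  have hget : ∀ (k : Int × Int),
      (((PySem.List.enumerate answers).map (fun q => (PySem.Int.mod q.1 40, q.2))).foldl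
        (fun d k => d.insert k (d.getD k 0 + 1)) PySem.Dict.empty).getD k 0
      = ((((PySem.List.enumerate answers).map (fun q => (PySem.Int.mod q.1 40, q.2))).count k : Nat) : Int) := by
    intro k
    rw [PySem.Dict.getD_foldl_insert_add_one]
    simp [PySem.Dict.getD_empty, List.count]
  simp only [hget]
  exact pvHist_sum p hne hdvd answers 0

theorem solution_eq (answers : List Int) : solution answers = solution_alt answers := by
  have hs : pvScoresA answers
      = [pvScoreFrom pvPatterns[0] answers 0,
         pvScoreFrom pvPatterns[1] answers 0,
         pvScoreFrom pvPatterns[2] answers 0] := by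
    have := pvScores_split answers 0 0 0 0
    simpa [pvScoresA] using this
  have hb : pvPatterns.map (fun p => pvPatScoreC (pvCounts answers) p)
      = [pvScoreFrom pvPatterns[0] answers 0,
         pvScoreFrom pvPatterns[1] answers 0,
         pvScoreFrom pvPatterns[2] answers 0] := by
    have d0 : pvPatterns[0] ≠ [] := by decide
    have d1 : pvPatterns[1] ≠ [] := by decide
    have d2 : pvPatterns[2] ≠ [] := by decide
    have v0 : ((pvPatterns[0].length : Nat) : Int) ∣ 40 := by decide
    have v1 : ((pvPatterns[1].length : Nat) : Int) ∣ 40 := by decide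
    have v2 : ((pvPatterns[2].length : Nat) : Int) ∣ 40 := by decide
    show [pvPatScoreC (pvCounts answers) pvPatterns[0],
          pvPatScoreC (pvCounts answers) pvPatterns[1],
          pvPatScoreC (pvCounts answers) pvPatterns[2]] = _
    rw [pvPatScoreC_eq answers _ d0 v0, pvPatScoreC_eq answers _ d1 v1,
        pvPatScoreC_eq answers _ d2 v2]
  simp only [solution, solution_alt]
  rw [hs, hb]
  have hr : PySem.List.pyRange 0 3 1 = [0, 1, 2] := by decide
  simp only [hr, List.foldl_cons, List.foldl_nil, PySem.List.enumerate_cons,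
             PySem.List.enumerate_nil]
  norm_num [PySem.List.pyGetD, PySem.List.pyGet?, PySem.List.pyIdx?,
            List.getElem_cons_succ, List.getElem_cons_zero]
  have ht : (Int.toNat 2) = 2 := rfl
  simp only [ht, List.getElem_cons_succ, List.getElem_cons_zero]

-- ===== VERDICT (by name: the statement is the Claim_ definition above) =====
theorem solution_spec : Claim_equal_solution := by
  intro answers _
  unfold Spec_solution
  exact solution_eq answers
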